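-- pv_equiv track=rewrite | github.com/jakobvalic/PRO2 | 0. ponovitev.py | stetje
-- ===== SOURCE A (Python) =====
-- def stetje(niz):
--     '''Z iteracijo po nizu.'''
--     nov_niz = ''
--     stevec = 1
--     for znak in niz:
--         if znak == '#':
--             nov_niz += str(stevec)
--             stevec += 1
--         else:
--             nov_niz += znak
--     return nov_niz
-- ===== SOURCE B (Python) =====
-- def stetje(niz):
--     '''Rebuild from the gaps between '#' markers: split once, then interleave counters.'''
--     parts = niz.split('#')
--     out = []
--     for i, p in enumerate(parts[1:], start=1):
--         out.append(str(i))
--         out.append(p)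
--     return parts[0] + ''.join(out)
-- ===== Notes on version B (the rewrite author's own statement) =====
-- stated objective: alternative
-- what changed: B splits the string once on '#' and reconstructs it by interleaving the counter values between the segments, instead of A's per-character loop with a running counter and branch.
import Mathlib
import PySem

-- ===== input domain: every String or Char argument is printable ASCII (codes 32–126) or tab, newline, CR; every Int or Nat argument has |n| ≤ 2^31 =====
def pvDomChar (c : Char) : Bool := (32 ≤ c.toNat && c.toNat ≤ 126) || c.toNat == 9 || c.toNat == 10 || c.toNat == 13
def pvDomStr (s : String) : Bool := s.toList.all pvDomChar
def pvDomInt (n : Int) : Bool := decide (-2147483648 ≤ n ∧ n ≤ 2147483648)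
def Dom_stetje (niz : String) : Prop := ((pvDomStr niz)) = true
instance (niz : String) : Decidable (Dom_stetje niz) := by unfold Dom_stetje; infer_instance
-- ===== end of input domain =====

-- B replaces A's per-character loop (branch + running counter) by one split on '#'
-- followed by interleaving the counter values between the segments (objective: alternative).

-- ===== PORT A =====
-- per-character fold over the string; state = (nov_niz, stevec)
def stetje (niz : String) : String :=
  let st := niz.toList.foldl
    (fun (st : List Char × Int) znak =>
      if znak = '#' then (st.1 ++ PySem.Int.toChars st.2, st.2 + 1)
      else (st.1 ++ [znak], st.2))
    ([], 1)
  String.ofList st.1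

-- ===== PORT B =====
-- parts = niz.split('#'); out accumulates str(i), parts[i] for the tail segments;
-- parts[0] is total here since split never returns an empty list (pyGetD is exact).
def stetje_alt (niz : String) : String :=
  let parts := PySem.Chars.splitOn niz.toList ['#']
  let out := (PySem.List.enumerate (PySem.List.slice parts (some 1) none) 1).foldl
    (fun (o : List (List Char)) pr => o ++ [PySem.Int.toChars pr.1] ++ [pr.2]) []
  String.ofList (PySem.List.pyGetD parts 0 [] ++ PySem.Chars.join [] out)

-- ===== PRECONDITION & SPEC =====
def Spec_stetje (niz : String) (out : String) : Prop := out = stetje_alt niz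
instance (niz : String) (out : String) : Decidable (Spec_stetje niz out) := by unfold Spec_stetje; infer_instance

-- ===== CLAIM (what is proved, stated in full; the proofs are below) =====
def Claim_equal_stetje : Prop := ∀ (niz : String), Dom_stetje niz → Spec_stetje niz (stetje niz)

-- ===== LEMMAS AND PROOFS =====

-- simple structural recursion computing split-on-'#' (proof-side characterisation)
def mySplit : List Char → List (List Char)
  | [] => [[]]
  | c :: rest =>
    if c = '#' then [] :: mySplit rest
    else
      match mySplit rest with
      | [] => [[c]]
      | p :: ps => (c :: p) :: ps

def glue (cur : List Char) : List (List Char) → List (List Char)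
  | [] => [cur]
  | p :: ps => (cur ++ p) :: ps

def interleave : List (List Char) → Int → List Char
  | [], _ => []
  | p :: ps, k => PySem.Int.toChars k ++ p ++ interleave ps (k + 1)

theorem mySplit_ne_nil (l : List Char) : mySplit l ≠ [] := by
  cases l with
  | nil => simp [mySplit]
  | cons c rest =>
    simp only [mySplit]
    split
    · simp
    · cases h : mySplit rest <;> simp

theorem splitOn_go_eq (l : List Char) : ∀ (fuel : Nat) (cur : List Char) (acc : List (List Char)),
    l.length < fuel →
    PySem.Chars.splitOn.go ['#'] fuel l cur acc = acc.reverse ++ glue cur.reverse (mySplit l) := by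
  induction l with
  | nil =>
    intro fuel cur acc h
    obtain ⟨f, rfl⟩ : ∃ f, fuel = f + 1 := ⟨fuel - 1, by omega⟩
    simp [PySem.Chars.splitOn.go, mySplit, glue]
  | cons c rest ih =>
    intro fuel cur acc h
    obtain ⟨f, rfl⟩ : ∃ f, fuel = f + 1 := ⟨fuel - 1, by omega⟩
    by_cases hc : c = '#'
    · subst hc
      have hpre : List.isPrefixOf ['#'] ('#' :: rest) = true := by simp [List.isPrefixOf]
      simp only [PySem.Chars.splitOn.go, hpre, if_pos]
      rw [show List.drop (['#'] : List Char).length ('#' :: rest) = rest by simp]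
      rw [ih f [] (List.reverse cur :: acc) (by simp at h ⊢; omega)]
      simp only [mySplit, reduceIte]
      cases hms : mySplit rest with
      | nil => exact absurd hms (mySplit_ne_nil rest)
      | cons p ps => simp [glue]
    · have hpre : List.isPrefixOf ['#'] (c :: rest) = false := by
        simp [List.isPrefixOf]
        intro hcEq
        exact hc hcEq.symm
      simp only [PySem.Chars.splitOn.go, hpre]
      rw [if_neg (by simp)]
      rw [ih f (c :: cur) acc (by simp at h ⊢; omega)]
      simp only [mySplit, if_neg hc]
      cases hms : mySplit rest with
      | nil => exact absurd hms (mySplit_ne_nil rest)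
      | cons p ps => simp [glue]

theorem splitOn_eq_mySplit (l : List Char) : PySem.Chars.splitOn l ['#'] = mySplit l := by
  unfold PySem.Chars.splitOn
  rw [splitOn_go_eq l (l.length + 1) [] [] (by omega)]
  cases hms : mySplit l with
  | nil => exact absurd hms (mySplit_ne_nil l)
  | cons p ps => simp [glue]

theorem joinNil_cons (x : List Char) (l : List (List Char)) :
    PySem.Chars.join [] (x :: l) = x ++ PySem.Chars.join [] l := by
  cases l with
  | nil => simp [PySem.Chars.join_singleton, PySem.Chars.join_nil]
  | cons y ys => simp [PySem.Chars.join_cons_cons]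

theorem joinNil_append (a b : List (List Char)) :
    PySem.Chars.join [] (a ++ b) = PySem.Chars.join [] a ++ PySem.Chars.join [] b := by
  induction a with
  | nil => simp [PySem.Chars.join_nil]
  | cons x xs ih => simp [joinNil_cons, ih]

theorem enum_foldl (ps : List (List Char)) : ∀ (s : Int) (o : List (List Char)),
    PySem.Chars.join [] ((PySem.List.enumerate ps s).foldl
      (fun (o : List (List Char)) pr => o ++ [PySem.Int.toChars pr.1] ++ [pr.2]) o)
    = PySem.Chars.join [] o ++ interleave ps s := by
  induction ps with
  | nil => intro s o; simp [PySem.List.enumerate_nil, interleave]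
  | cons p ps ih =>
    intro s o
    rw [PySem.List.enumerate_cons]
    simp only [List.foldl_cons]
    rw [ih (s + 1) (o ++ [PySem.Int.toChars s] ++ [p])]
    rw [joinNil_append, joinNil_append]
    simp [interleave]

def bCore (l : List Char) (k : Int) : List Char :=
  match mySplit l with
  | [] => []
  | p :: ps => p ++ interleave ps k

theorem afold_eq (l : List Char) : ∀ (acc : List Char) (k : Int),
    (l.foldl (fun (st : List Char × Int) znak =>
      if znak = '#' then (st.1 ++ PySem.Int.toChars st.2, st.2 + 1)
      else (st.1 ++ [znak], st.2)) (acc, k)).1 = acc ++ bCore l k := by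
  induction l with
  | nil => intro acc k; simp [bCore, mySplit, interleave]
  | cons c rest ih =>
    intro acc k
    by_cases hc : c = '#'
    · subst hc
      simp only [List.foldl_cons, reduceIte]
      rw [ih]
      simp only [bCore, mySplit, reduceIte]
      cases hms : mySplit rest with
      | nil => exact absurd hms (mySplit_ne_nil rest)
      | cons p ps => simp [interleave]
    · simp only [List.foldl_cons, if_neg hc]
      rw [ih]
      simp only [bCore, mySplit, if_neg hc]
      cases hms : mySplit rest with
      | nil => exact absurd hms (mySplit_ne_nil rest)
      | cons p ps => simp

-- ===== VERDICT (by name: the statement is the Claim_ definition above) =====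
theorem stetje_spec : Claim_equal_stetje := by
  intro niz _
  show stetje niz = stetje_alt niz
  simp only [stetje, stetje_alt, splitOn_eq_mySplit, PySem.List.slice_from_one]
  rw [afold_eq niz.toList [] 1]
  cases hms : mySplit niz.toList with
  | nil => exact absurd hms (mySplit_ne_nil niz.toList)
  | cons p ps =>
    simp only [List.tail_cons]
    rw [enum_foldl ps 1 []]
    simp [PySem.List.pyGetD, PySem.Chars.join_nil, bCore, hms]
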